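-- pv_equiv track=rewrite | github.com/ibis-ssl/crane_ci_metrics | scripts/goal_scene_collector.py | find_log_artifact
-- ===== SOURCE A (Python) =====
-- def find_log_artifact(artifacts: list) -> dict | None:
--     """アーティファクト一覧からSSL game logを含むものを探す。
--
--     アーティファクト名: match-ssl-log-{sha}
--     """
--     for a in artifacts:
--         name = a.get("name", "")
--         if name.startswith("match-ssl-log-"):
--             return a
--     # フォールバック: ログ関連のキーワードで検索
--     for a in artifacts:
--         name = a.get("name", "").lower()
--         if "ssl-log" in name or "game-log" in name or "gamelog" in name:
--             return a
--     return None
-- ===== SOURCE B (Python) =====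
-- def find_log_artifact(artifacts: list) -> dict | None:
--     """Single pass: prefix match returns immediately; first fallback kept pending."""
--     pending = None
--     for a in artifacts:
--         name = a.get("name", "")
--         if name.startswith("match-ssl-log-"):
--             return a
--         if pending is None:
--             low = name.lower()
--             if "ssl-log" in low or "game-log" in low or "gamelog" in low:
--                 pending = a
--     return pending
-- ===== Notes on version B (the rewrite author's own statement) =====
-- stated objective: alternative
-- what changed: Replaces A's two sequential scans (prefix pass, then lowercase-keyword fallback pass) by one pass that returns on a prefix match and records only the first fallback candidate.
import Mathlib
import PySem

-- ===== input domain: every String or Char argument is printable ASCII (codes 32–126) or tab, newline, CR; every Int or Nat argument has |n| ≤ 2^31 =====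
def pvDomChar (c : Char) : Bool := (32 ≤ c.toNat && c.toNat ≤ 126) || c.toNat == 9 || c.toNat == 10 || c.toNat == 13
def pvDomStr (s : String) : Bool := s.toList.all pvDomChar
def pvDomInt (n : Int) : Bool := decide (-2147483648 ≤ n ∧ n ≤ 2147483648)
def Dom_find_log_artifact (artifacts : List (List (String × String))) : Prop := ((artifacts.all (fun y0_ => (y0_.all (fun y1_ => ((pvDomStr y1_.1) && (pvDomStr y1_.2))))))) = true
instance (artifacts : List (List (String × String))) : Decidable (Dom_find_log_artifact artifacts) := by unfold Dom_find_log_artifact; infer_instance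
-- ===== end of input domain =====

-- B replaces A's two sequential scans by a single pass that returns on a prefix
-- match and records the first lowercase-keyword fallback candidate (same O(n) cost).


-- ===== PORT A =====
-- a.get("name", "")
def flaName (a : List (String × String)) : String :=
  (PySem.Dict.ofList a).getD "name" ""

-- fallback keyword test on the lowercased name
def flaFallback (name : String) : Bool :=
  PySem.Str.isIn "ssl-log" name || PySem.Str.isIn "game-log" name || PySem.Str.isIn "gamelog" name

-- first loop of A
def flaPass1 : List (List (String × String)) → Option (List (String × String))
  | [] => none
  | a :: rest =>
    if PySem.Str.startswith (flaName a) "match-ssl-log-" then some a else flaPass1 rest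

-- second loop of A
def flaPass2 : List (List (String × String)) → Option (List (String × String))
  | [] => none
  | a :: rest =>
    if flaFallback (PySem.Str.lower (flaName a)) then some a else flaPass2 rest

def find_log_artifact (artifacts : List (List (String × String))) : Option (List (String × String)) :=
  match flaPass1 artifacts with
  | some a => some a
  | none => flaPass2 artifacts

-- ===== PORT B =====
-- single pass with the pending fallback candidate as state
def flaAltGo (pending : Option (List (String × String))) :
    List (List (String × String)) → Option (List (String × String))
  | [] => pending
  | a :: rest =>
    let name := flaName a
    if PySem.Str.startswith name "match-ssl-log-" then some a
    else
      let pending' :=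
        match pending with
        | some p => some p
        | none => if flaFallback (PySem.Str.lower name) then some a else none
      flaAltGo pending' rest

def find_log_artifact_alt (artifacts : List (List (String × String))) : Option (List (String × String)) :=
  flaAltGo none artifacts

-- ===== PRECONDITION & SPEC =====
def Spec_find_log_artifact (artifacts : List (List (String × String))) (out : Option (List (String × String))) : Prop := out = find_log_artifact_alt artifacts
instance (artifacts : List (List (String × String))) (out : Option (List (String × String))) : Decidable (Spec_find_log_artifact artifacts out) := by unfold Spec_find_log_artifact; infer_instance

-- ===== CLAIM (what is proved, stated in full; the proofs are below) =====
def Claim_equal_find_log_artifact : Prop := ∀ (artifacts : List (List (String × String))), Dom_find_log_artifact artifacts → Spec_find_log_artifact artifacts (find_log_artifact artifacts)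

-- ===== LEMMAS AND PROOFS =====
-- loop invariant: B's single pass equals "pass1, else pending, else pass2"
theorem flaAltGo_eq (arts : List (List (String × String)))
    (pending : Option (List (String × String))) :
    flaAltGo pending arts =
      match flaPass1 arts with
      | some a => some a
      | none =>
        match pending with
        | some p => some p
        | none => flaPass2 arts := by
  induction arts generalizing pending with
  | nil => cases pending <;> simp [flaAltGo, flaPass1, flaPass2]
  | cons a rest ih =>
    simp only [flaAltGo, flaPass1, flaPass2]
    split_ifs with hpre hfb
    · rfl
    · rfl
    · cases pending <;> rw [ih]
    · cases pending <;> rw [ih]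

-- ===== VERDICT (by name: the statement is the Claim_ definition above) =====
theorem find_log_artifact_spec : Claim_equal_find_log_artifact := by
  intro artifacts _
  unfold Spec_find_log_artifact find_log_artifact find_log_artifact_alt
  rw [flaAltGo_eq]
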